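-- pv_equiv track=rewrite | github.com/Jskenpo/PROYECTO2_ALGORITMOS | proyecto.py | longest_non_prefix_set_dynamic
-- ===== SOURCE A (Python) =====
-- def longest_non_prefix_set_dynamic(strings):
--     strings.sort(key=len)
--     n = len(strings)
--     dp = [0] * n
--     dp[0] = 1
--     prefix_set = {strings[0]}
--
--     for i in range(1, n):
--         if not any(strings[i].startswith(s) for s in prefix_set):
--             dp[i] = dp[i-1] + 1
--             prefix_set.add(strings[i])
--         else:
--             dp[i] = dp[i-1]
--
--     return dp[-1]
-- ===== SOURCE B (Python) =====
-- def longest_non_prefix_set_dynamic(strings):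
--     strings.sort(key=len)
--     kept = set()
--     count = 0
--     for s in strings:
--         if all(s[:k] not in kept for k in range(len(s) + 1)):
--             kept.add(s)
--             count += 1
--     return count
-- ===== Notes on version B (the rewrite author's own statement) =====
-- stated objective: alternative
-- what changed: Instead of scanning the whole kept set per string (any(s.startswith(p))), B tests each of the string's own prefixes for membership in the kept set, and replaces the dp array with a plain counter.
import Mathlib
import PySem

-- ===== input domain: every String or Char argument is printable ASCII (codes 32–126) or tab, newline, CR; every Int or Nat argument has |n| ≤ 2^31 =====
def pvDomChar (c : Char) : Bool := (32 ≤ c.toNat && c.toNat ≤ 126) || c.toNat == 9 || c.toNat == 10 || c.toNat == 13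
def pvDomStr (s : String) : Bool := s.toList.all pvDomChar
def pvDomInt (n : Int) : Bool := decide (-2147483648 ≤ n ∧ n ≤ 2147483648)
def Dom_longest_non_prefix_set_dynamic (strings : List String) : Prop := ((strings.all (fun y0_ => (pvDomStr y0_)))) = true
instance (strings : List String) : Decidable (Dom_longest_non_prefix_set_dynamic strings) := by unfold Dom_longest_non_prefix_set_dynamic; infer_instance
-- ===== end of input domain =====

-- B replaces A's inner scan over the whole kept set (any startswith) by membership tests of
-- the string's own prefixes in the kept set, and drops the dp array for a plain counter
-- (objective: alternative).
-- Both A and B sort the argument list in place (same side effect); the equivalence proved here is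
-- about the return value.

-- ===== PORT A =====
def longest_non_prefix_set_dynamic (strings : List String) : Int :=
  let ss := PySem.List.sorted strings (fun s => PySem.Str.len s)
  let n := ss.length
  let dp : List Int := List.replicate n 0
  match dp with
  | [] => 0  -- Python raises IndexError at dp[0] = 1 here (empty input); excluded by Pre_
  | _ :: _ =>
    let dp := dp.set 0 1
    let prefix_set : PySem.Set String := PySem.Set.ofList [PySem.List.pyGetD ss 0 ""]
    let st := (PySem.List.pyRange 1 n).foldl (fun (st : List Int × PySem.Set String) i =>
      let si := PySem.List.pyGetD ss i ""
      if ¬ (st.2.any fun s => PySem.Str.startswith si s) then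
        ((st.1.set i.toNat (PySem.List.pyGetD st.1 (i-1) 0 + 1)), PySem.Set.add st.2 si)
      else
        ((st.1.set i.toNat (PySem.List.pyGetD st.1 (i-1) 0)), st.2)) (dp, prefix_set)
    PySem.List.pyGetD st.1 (-1) 0

-- ===== PORT B =====
def longest_non_prefix_set_dynamic_alt (strings : List String) : Int :=
  let ss := PySem.List.sorted strings (fun s => PySem.Str.len s)
  (ss.foldl (fun (st : PySem.Set String × Int) s =>
      if (PySem.List.pyRange 0 (PySem.Str.len s + 1)).all
           (fun k => ¬ PySem.Set.contains st.1 (PySem.Str.slice s none (some k))) then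
        (PySem.Set.add st.1 s, st.2 + 1)
      else st) (PySem.Set.empty, 0)).2

-- ===== PRECONDITION & SPEC =====
-- Pre_ excludes only the empty list, on which Python A raises IndexError (dp[0] = 1 on dp = []).
def Pre_longest_non_prefix_set_dynamic (strings : List String) : Prop := strings ≠ []
instance (strings : List String) : Decidable (Pre_longest_non_prefix_set_dynamic strings) := by
  unfold Pre_longest_non_prefix_set_dynamic; infer_instance
def pvWitness_longest_non_prefix_set_dynamic : List String := ["a", "ab", "b"]

def Spec_longest_non_prefix_set_dynamic (strings : List String) (out : Int) : Prop := out = longest_non_prefix_set_dynamic_alt strings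
instance (strings : List String) (out : Int) : Decidable (Spec_longest_non_prefix_set_dynamic strings out) := by unfold Spec_longest_non_prefix_set_dynamic; infer_instance

-- ===== CLAIM (what is proved, stated in full; the proofs are below) =====
def Claim_equal_longest_non_prefix_set_dynamic : Prop := ∀ (strings : List String), Dom_longest_non_prefix_set_dynamic strings → Pre_longest_non_prefix_set_dynamic strings → Spec_longest_non_prefix_set_dynamic strings (longest_non_prefix_set_dynamic strings)

-- ===== LEMMAS AND PROOFS =====

-- B's per-string test, named for the proofs (identical to the lambda body in the port of B).
def pvCondB (ps : PySem.Set String) (s : String) : Bool :=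
  (PySem.List.pyRange 0 (PySem.Str.len s + 1)).all
    (fun k => ¬ PySem.Set.contains ps (PySem.Str.slice s none (some k)))

-- B's loop, written as a structural recursion (equals B's foldl; proved below).
def pvLoopB (ps : PySem.Set String) (c : Int) : List String → Int
  | [] => c
  | s :: rest =>
    if pvCondB ps s then pvLoopB (PySem.Set.add ps s) (c + 1) rest
    else pvLoopB ps c rest

theorem pvLoopB_eq_foldl (l : List String) (ps : PySem.Set String) (c : Int) :
    pvLoopB ps c l = (l.foldl (fun (st : PySem.Set String × Int) s =>
      if (PySem.List.pyRange 0 (PySem.Str.len s + 1)).all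
           (fun k => ¬ PySem.Set.contains st.1 (PySem.Str.slice s none (some k))) then
        (PySem.Set.add st.1 s, st.2 + 1)
      else st) (ps, c)).2 := by
  induction l generalizing ps c with
  | nil => rfl
  | cons s rest ih =>
    simp only [pvLoopB, pvCondB, List.foldl_cons]
    split_ifs with h <;> simp [ih]

-- A's membership condition (some kept string is a prefix of s) equals the negation of B's
-- (no prefix of s is kept).
theorem pv_cond_equiv (ps : PySem.Set String) (s : String) :
    (ps.any fun p => PySem.Str.startswith s p) = !pvCondB ps s := by
  have key : (ps.any fun p => PySem.Str.startswith s p) = true ↔ ¬ (pvCondB ps s = true) := by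
    simp only [pvCondB, List.any_eq_true, List.all_eq_true, not_forall,
      PySem.Str.startswith_eq, PySem.Chars.startswith, PySem.Set.contains,
      List.contains_eq_any_beq, decide_eq_true_eq, not_not, beq_iff_eq]
    constructor
    · rintro ⟨p, hp, hpre⟩
      rw [List.isPrefixOf_iff_prefix] at hpre
      refine ⟨(p.toList.length : Int), ⟨?_, ⟨p, hp, ?_⟩⟩⟩
      · rw [PySem.List.mem_pyRange_one, PySem.Str.len_eq]
        have := hpre.length_le
        omega
      · rw [← String.toList_inj, PySem.Str.toList_slice, PySem.Chars.slice_eq_listSlice,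
          PySem.List.slice_to _ (by positivity)]
        rw [Int.toNat_natCast]
        exact (List.prefix_iff_eq_take.mp hpre).symm
    · rintro ⟨k, hk, p, hp, hpk⟩
      rw [PySem.List.mem_pyRange_one] at hk
      refine ⟨p, hp, ?_⟩
      rw [List.isPrefixOf_iff_prefix, ← String.toList_inj] at *
      rw [← hpk, PySem.Str.toList_slice, PySem.Chars.slice_eq_listSlice,
        PySem.List.slice_to _ hk.1]
      exact List.take_prefix _ _
  cases hb : pvCondB ps s
  · simpa using key.mpr (by simp [hb])
  · simp only [Bool.not_true]
    rw [← Bool.not_eq_true]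
    intro h
    exact key.mp h (by rw [hb])

theorem pv_getD_set_self (dp : List Int) (j : Nat) (v d : Int) (hj : j < dp.length) :
    PySem.List.pyGetD (dp.set j v) (j : Int) d = v := by
  rw [PySem.List.pyGetD_of_nonneg _ _ (by positivity)]
  simp [List.getD, hj]

-- A's loop invariant: if dp[i-1] already holds the running count c, then A's remaining fold
-- (over range(i, n)) ends with dp[-1] = pvLoopB ps c (ss.drop i).
theorem pv_loopA_eq (ss : List String) (fuel : Nat) :
    ∀ (i : Int) (dp : List Int) (ps : PySem.Set String) (c : Int),
    fuel = ss.length - i.toNat → 1 ≤ i → i ≤ (ss.length : Int) →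
    dp.length = ss.length →
    PySem.List.pyGetD dp (i - 1) 0 = c →
    PySem.List.pyGetD (((PySem.List.pyRange i ss.length).foldl
        (fun (st : List Int × PySem.Set String) j =>
          let sj := PySem.List.pyGetD ss j ""
          if ¬ (st.2.any fun s => PySem.Str.startswith sj s) then
            ((st.1.set j.toNat (PySem.List.pyGetD st.1 (j-1) 0 + 1)), PySem.Set.add st.2 sj)
          else
            ((st.1.set j.toNat (PySem.List.pyGetD st.1 (j-1) 0)), st.2)) (dp, ps)).1) (-1) 0
      = pvLoopB ps c (ss.drop i.toNat) := by
  induction fuel with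
  | zero =>
    intro i dp ps c hfuel h1 hn hlen hprev
    have hi : i = (ss.length : Int) := by omega
    have hrange : PySem.List.pyRange i ss.length = [] := by
      simp [PySem.List.pyRange, hi]
    have hdrop : ss.drop i.toNat = [] := by
      apply List.drop_eq_nil_of_le; omega
    rw [hrange, hdrop]
    simp only [List.foldl_nil, pvLoopB]
    have hne : dp ≠ [] := by
      intro h; rw [h] at hlen; simp at hlen; omega
    rw [PySem.List.pyGetD_neg_one dp 0 hne, List.getLast_eq_getElem]
    rw [PySem.List.pyGetD_of_nonneg _ _ (by omega)] at hprev
    have h2 : (i - 1).toNat = dp.length - 1 := by omega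
    rw [h2] at hprev
    rw [← hprev]
    have hlt : dp.length - 1 < dp.length := by omega
    simp [List.getD, List.getElem?_eq_getElem hlt]
  | succ m ih =>
    intro i dp ps c hfuel h1 hn hlen hprev
    have hilt : i < (ss.length : Int) := by omega
    rw [PySem.List.pyRange_one_cons hilt]
    have hidx : i.toNat < ss.length := by omega
    have hdrop : ss.drop i.toNat = ss[i.toNat] :: ss.drop (i.toNat + 1) :=
      List.drop_eq_getElem_cons hidx
    have hsi : PySem.List.pyGetD ss i "" = ss[i.toNat] := by
      rw [PySem.List.pyGetD_of_nonneg _ _ (by omega)]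
      simp [List.getD, List.getElem?_eq_getElem hidx]
    rw [hdrop]
    simp only [List.foldl_cons, pvLoopB, hsi, hprev]
    have hset : ∀ v : Int, ((dp.set i.toNat v).length = ss.length) := by
      intro v; simp [hlen]
    have hget : ∀ v : Int, PySem.List.pyGetD (dp.set i.toNat v) ((i + 1) - 1) 0 = v := by
      intro v
      have h2 : (i + 1 - 1) = ((i.toNat : Int)) := by omega
      rw [h2]
      exact pv_getD_set_self dp i.toNat v 0 (by omega)
    have htn : (i + 1).toNat = i.toNat + 1 := by omega
    have hcb := pv_cond_equiv ps ss[i.toNat]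
    cases hc : pvCondB ps ss[i.toNat] with
    | true =>
      rw [hc, Bool.not_true] at hcb
      rw [if_pos (show ¬ ((ps.any fun s => PySem.Str.startswith ss[i.toNat] s) = true) by
            rw [hcb]; exact Bool.false_ne_true),
        if_pos (rfl : (true : Bool) = true),
        ih (i + 1) _ _ (c + 1) (by omega) (by omega) (by omega) (hset _) (hget _), htn]
    | false =>
      rw [hc, Bool.not_false] at hcb
      rw [if_neg (show ¬ ¬ ((ps.any fun s => PySem.Str.startswith ss[i.toNat] s) = true) by
            rw [hcb]; exact not_not_intro rfl),
        if_neg (show ¬ ((false : Bool) = true) by exact Bool.false_ne_true),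
        ih (i + 1) _ _ c (by omega) (by omega) (by omega) (hset _) (hget _), htn]

-- ===== VERDICT (by name: the statement is the Claim_ definition above) =====
theorem longest_non_prefix_set_dynamic_spec : Claim_equal_longest_non_prefix_set_dynamic := by
  intro strings _ hpre
  unfold Spec_longest_non_prefix_set_dynamic
  unfold longest_non_prefix_set_dynamic longest_non_prefix_set_dynamic_alt
  have hss : PySem.List.sorted strings (fun s => PySem.Str.len s) ≠ [] := by
    rw [Ne, PySem.List.sorted_eq_nil_iff]
    exact hpre
  cases hcase : PySem.List.sorted strings (fun s => PySem.Str.len s) with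
  | nil => exact absurd hcase hss
  | cons s0 rest =>
    simp only [List.length_cons, List.replicate_succ, List.set_cons_zero]
    rw [← pvLoopB_eq_foldl]
    have hgd0 : PySem.List.pyGetD (s0 :: rest) 0 "" = s0 := by
      simp [PySem.List.pyGetD_of_nonneg _ _ (le_refl 0), List.getD]
    have hA := pv_loopA_eq (s0 :: rest) rest.length 1
      (1 :: List.replicate rest.length 0) (PySem.Set.ofList [PySem.List.pyGetD (s0 :: rest) 0 ""]) 1
      (by simp) (by omega) (by simp) (by simp) (by simp [PySem.List.pyGetD_of_nonneg _ _ (le_refl 0), List.getD])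
    simp only [List.length_cons] at hA ⊢
    rw [hA]
    have hofl : PySem.Set.ofList [PySem.List.pyGetD (s0 :: rest) 0 ""] = [s0] := by
      rw [hgd0]; rfl
    have hc0 : pvCondB ([] : PySem.Set String) s0 = true := by
      simp [pvCondB, PySem.Set.contains]
    have hadd : PySem.Set.add ([] : PySem.Set String) s0 = [s0] := by
      simp [PySem.Set.add, PySem.Set.contains]
    rw [hofl]
    norm_num [pvLoopB, hc0, hadd]
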